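-- pv_equiv track=rewrite | github.com/alexxxstep/main_academy | mainacademy/LabWorks/LW_2/LW_2_3_3.py | clean_phrase
-- ===== SOURCE A (Python) =====
-- import string
--
-- def clean_phrase(phrase):
--     # get str punctuations
--     punct = string.punctuation
--
--     # replace any characters
--     for i in punct:
--         phrase = phrase.replace(i, '')
--
--     phrase = phrase.replace('N', '')
--
--     # replace spaces
--     phrase = phrase.replace(' ', '')
--     phrase = phrase.lower()
--
--     return phrase
-- ===== SOURCE B (Python) =====
-- import string
--
-- def clean_phrase(phrase):
--     return phrase.translate(str.maketrans('', '', string.punctuation + 'N ')).lower()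
-- ===== Notes on version B (the rewrite author's own statement) =====
-- stated objective: faster
-- what changed: Replaces A's 34 sequential full-string replace passes with a single translate pass that deletes every unwanted character against a deletion table built once, lowercasing the result.
import Mathlib
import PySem

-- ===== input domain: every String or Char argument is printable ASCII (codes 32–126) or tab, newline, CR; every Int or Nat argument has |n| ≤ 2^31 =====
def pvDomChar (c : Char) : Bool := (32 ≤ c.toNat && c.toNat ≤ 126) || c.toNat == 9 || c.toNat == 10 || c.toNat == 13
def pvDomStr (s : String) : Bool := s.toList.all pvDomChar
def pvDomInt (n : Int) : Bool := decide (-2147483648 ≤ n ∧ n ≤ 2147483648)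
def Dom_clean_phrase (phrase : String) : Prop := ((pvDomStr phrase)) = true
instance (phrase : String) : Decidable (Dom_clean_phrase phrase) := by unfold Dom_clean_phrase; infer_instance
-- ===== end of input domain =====

-- B replaces A's 34 sequential full-string replace passes with a single translate pass that
-- deletes every unwanted character against a deletion table built once (objective: faster).

-- string.punctuation
def pvPunct : String := "!\"#$%&'()*+,-./:;<=>?@[\\]^_`{|}~"

-- ===== PORT A =====
def clean_phrase (phrase : String) : String :=
  let p1 := pvPunct.toList.foldl (fun s c => PySem.Str.replace s (String.ofList [c]) "") phrase
  let p2 := PySem.Str.replace p1 "N" ""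
  let p3 := PySem.Str.replace p2 " " ""
  PySem.Str.lower p3

-- ===== PORT B =====
-- phrase.translate(str.maketrans('', '', deleteChars)): the table has no mappings, only
-- deletions, so it is exactly "drop every character occurring in deleteChars" — ported by
-- hand as a filter over the code points (exact: all arguments are ASCII, no mapping entries).
def clean_phrase_alt (phrase : String) : String :=
  let deleteChars : List Char := (pvPunct ++ "N ").toList
  PySem.Str.lower (String.ofList (phrase.toList.filter (fun c => !(deleteChars.contains c))))

-- ===== PRECONDITION & SPEC =====
def Spec_clean_phrase (phrase : String) (out : String) : Prop := out = clean_phrase_alt phrase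
instance (phrase : String) (out : String) : Decidable (Spec_clean_phrase phrase out) := by unfold Spec_clean_phrase; infer_instance

-- ===== CLAIM (what is proved, stated in full; the proofs are below) =====
def Claim_equal_clean_phrase : Prop := ∀ (phrase : String), Dom_clean_phrase phrase → Spec_clean_phrase phrase (clean_phrase phrase)

-- ===== LEMMAS AND PROOFS =====

-- replace.go with a single-char pattern and empty replacement, given enough fuel, is a filter
theorem pv_go_single (c : Char) : ∀ (fuel : Nat) (l acc : List Char), l.length ≤ fuel →
    PySem.Chars.replace.go [c] [] fuel l acc = acc.reverse ++ l.filter (fun x => !(x == c)) := by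
  intro fuel
  induction fuel with
  | zero => intro l acc h; cases l <;> simp_all [PySem.Chars.replace.go]
  | succ n ih =>
    intro l acc h
    cases l with
    | nil => simp [PySem.Chars.replace.go]
    | cons a t =>
      rw [PySem.Chars.replace.go]
      by_cases hac : a = c
      · subst hac
        simp only [List.isPrefixOf, BEq.rfl, Bool.true_and, if_true,
          List.length_singleton, List.drop_one, List.tail_cons, List.reverse_nil, List.nil_append]
        rw [ih t acc (by simpa using h)]
        rw [List.filter_cons]
        simp
      · have hpre : ([c].isPrefixOf (a :: t)) = false := by
          simp [List.isPrefixOf]; exact fun h' => (hac h'.symm).elim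
        rw [hpre]
        rw [if_neg (by simp)]
        rw [ih t (a :: acc) (by simpa using h)]
        rw [List.filter_cons]
        simp [hac]

-- s.replace(c, '') deletes exactly the occurrences of the character c
theorem pv_replace_single (c : Char) (cs : List Char) :
    PySem.Chars.replace cs [c] [] = cs.filter (fun x => !(x == c)) := by
  rw [PySem.Chars.replace]
  simp only [List.isEmpty_cons, if_false, Bool.false_eq_true]
  simpa using pv_go_single c cs.length cs [] le_rfl

-- A's loop of single-char replaces is one filter against the whole character list
theorem pv_foldl_replace (cs : List Char) (s : String) :
    (cs.foldl (fun s c => PySem.Str.replace s (String.ofList [c]) "") s).toList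
      = s.toList.filter (fun x => !(cs.contains x)) := by
  induction cs generalizing s with
  | nil => simp
  | cons c t ih =>
    rw [List.foldl_cons, ih]
    have h : (PySem.Str.replace s (String.ofList [c]) "").toList
        = s.toList.filter (fun x => !(x == c)) := by
      rw [PySem.Str.toList_replace]
      simp [pv_replace_single]
    rw [h, List.filter_filter]
    apply List.filter_congr
    intro x _
    by_cases hx : x = c <;> simp [hx]

-- ===== VERDICT (by name: the statement is the Claim_ definition above) =====
theorem clean_phrase_spec : Claim_equal_clean_phrase := by
  intro phrase _
  unfold Spec_clean_phrase clean_phrase clean_phrase_alt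
  simp only [PySem.Str.lower]
  apply congrArg String.ofList
  apply congrArg PySem.Chars.lower
  rw [String.toList_ofList]
  have h2 : ∀ (u : String) (c : Char), (PySem.Str.replace u (String.ofList [c]) "").toList
      = u.toList.filter (fun x => !(x == c)) := by
    intro u c
    rw [PySem.Str.toList_replace]
    simp [pv_replace_single]
  have hN : ("N" : String) = String.ofList ['N'] := rfl
  have hS : (" " : String) = String.ofList [' '] := rfl
  rw [hN, hS, h2, h2, pv_foldl_replace, List.filter_filter, List.filter_filter]
  apply List.filter_congr
  intro x _
  rw [Bool.eq_iff_iff]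
  simp
  tauto
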